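-- pv_equiv track=rewrite | github.com/vredrick/task-agent | enhanced_prompt_helpers.py | get_tool_summary
-- ===== SOURCE A (Python) =====
-- from typing import Dict, Any, Callable, List, Optional
--
-- def get_tool_summary(tools: List[str]) -> str:
--     """Create a concise summary of available tools."""
--     if not tools:
--         return "No specific tools"
--
--     # Group tools by category
--     categories = {
--         'read': ['Read', 'Grep', 'Search', 'Glob', 'LS'],
--         'write': ['Write', 'Edit', 'MultiEdit'],
--         'execute': ['Bash'],
--         'web': ['WebSearch', 'WebFetch'],
--         'notebook': ['NotebookRead', 'NotebookEdit'],
--         'other': []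
--     }
--
--     tool_groups = []
--     categorized = set()
--
--     for category, cat_tools in categories.items():
--         matching = [t for t in tools if t in cat_tools]
--         if matching:
--             if category == 'read':
--                 tool_groups.append("Code reading/searching")
--             elif category == 'write':
--                 tool_groups.append("Code modification")
--             elif category == 'execute':
--                 tool_groups.append("Command execution")
--             elif category == 'web':
--                 tool_groups.append("Web research")
--             elif category == 'notebook':
--                 tool_groups.append("Jupyter notebooks")
--             categorized.update(matching)
--
--     # Add any uncategorized tools
--     other_tools = [t for t in tools if t not in categorized]
--     if other_tools:
--         tool_groups.append(f"Specialized ({', '.join(other_tools[:3])})")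
--
--     return ", ".join(tool_groups)
-- ===== SOURCE B (Python) =====
-- _CATEGORIES = [
--     ('read', 'Code reading/searching'),
--     ('write', 'Code modification'),
--     ('execute', 'Command execution'),
--     ('web', 'Web research'),
--     ('notebook', 'Jupyter notebooks'),
-- ]
--
-- # reverse lookup: tool name -> category key
-- _TOOL_CAT = {
--     'Read': 'read', 'Grep': 'read', 'Search': 'read', 'Glob': 'read', 'LS': 'read',
--     'Write': 'write', 'Edit': 'write', 'MultiEdit': 'write',
--     'Bash': 'execute',
--     'WebSearch': 'web', 'WebFetch': 'web',
--     'NotebookRead': 'notebook', 'NotebookEdit': 'notebook',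
-- }
--
--
-- def get_tool_summary(tools):
--     """Create a concise summary of available tools."""
--     if not tools:
--         return "No specific tools"
--     present = set()
--     other = []
--     for t in tools:
--         c = _TOOL_CAT.get(t)
--         if c is not None:
--             present.add(c)
--         else:
--             other.append(t)
--     parts = [label for key, label in _CATEGORIES if key in present]
--     if other:
--         parts.append("Specialized ({})".format(", ".join(other[:3])))
--     return ", ".join(parts)
-- ===== Notes on version B (the rewrite author's own statement) =====
-- stated objective: idiomatic
-- what changed: A scans the whole tool list once per category and accumulates a 'categorized' set; B builds a fixed reverse tool-to-category dict once and makes a single pass over the tools, collecting the set of present categories and the uncategorized tools, then emits the labels in the fixed category order.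
import Mathlib
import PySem

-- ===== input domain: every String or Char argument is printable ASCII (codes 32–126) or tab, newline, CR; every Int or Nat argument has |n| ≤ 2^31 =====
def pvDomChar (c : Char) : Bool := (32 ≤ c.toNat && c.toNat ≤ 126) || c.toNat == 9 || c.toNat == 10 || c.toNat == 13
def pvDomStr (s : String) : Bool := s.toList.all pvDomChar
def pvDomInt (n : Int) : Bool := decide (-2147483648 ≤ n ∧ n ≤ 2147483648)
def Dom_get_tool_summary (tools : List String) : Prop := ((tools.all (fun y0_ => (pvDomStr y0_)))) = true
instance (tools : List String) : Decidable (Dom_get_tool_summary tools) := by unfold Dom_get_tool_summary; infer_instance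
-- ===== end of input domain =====

-- B replaces A's per-category scans of `tools` by a reverse tool→category dict and ONE pass
-- over `tools` (objective: idiomatic; the category table is fixed, so the asymptotic cost is the same).

-- ===== PORT A =====
-- the literal `categories` dict of A, as an insertion-ordered association list
def aCategories : List (String × List String) :=
  [("read", ["Read", "Grep", "Search", "Glob", "LS"]),
   ("write", ["Write", "Edit", "MultiEdit"]),
   ("execute", ["Bash"]),
   ("web", ["WebSearch", "WebFetch"]),
   ("notebook", ["NotebookRead", "NotebookEdit"]),
   ("other", [])]

def get_tool_summary (tools : List String) : String :=
  if tools.isEmpty then "No specific tools" else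
  -- for category, cat_tools in categories.items(): …
  let st := aCategories.foldl (fun (st : List String × PySem.Set String) cp =>
      let matching := tools.filter (fun t => cp.2.contains t)
      if matching.isEmpty then st
      else
        let groups :=
          if cp.1 == "read" then st.1 ++ ["Code reading/searching"]
          else if cp.1 == "write" then st.1 ++ ["Code modification"]
          else if cp.1 == "execute" then st.1 ++ ["Command execution"]
          else if cp.1 == "web" then st.1 ++ ["Web research"]
          else if cp.1 == "notebook" then st.1 ++ ["Jupyter notebooks"]
          else st.1
        (groups, PySem.Set.update st.2 matching)) ([], PySem.Set.empty)
  let other_tools := tools.filter (fun t => !(PySem.Set.contains st.2 t))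
  let tool_groups := if other_tools.isEmpty then st.1
    else st.1 ++ ["Specialized (" ++ PySem.Str.join ", " (PySem.List.slice other_tools none (some 3)) ++ ")"]
  PySem.Str.join ", " tool_groups

-- ===== PORT B =====
-- B's fixed (key, label) table _CATEGORIES
def bCategories : List (String × String) :=
  [("read", "Code reading/searching"),
   ("write", "Code modification"),
   ("execute", "Command execution"),
   ("web", "Web research"),
   ("notebook", "Jupyter notebooks")]

-- B's literal reverse-lookup dict _TOOL_CAT (distinct literal keys)
def bToolCat : PySem.Dict String String :=
  PySem.Dict.mk
    [("Read", "read"), ("Grep", "read"), ("Search", "read"), ("Glob", "read"), ("LS", "read"),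
     ("Write", "write"), ("Edit", "write"), ("MultiEdit", "write"),
     ("Bash", "execute"),
     ("WebSearch", "web"), ("WebFetch", "web"),
     ("NotebookRead", "notebook"), ("NotebookEdit", "notebook")]

def get_tool_summary_alt (tools : List String) : String :=
  if tools.isEmpty then "No specific tools" else
  -- one pass: collect present categories and uncategorized tools
  let st := tools.foldl (fun (st : PySem.Set String × List String) t =>
      match PySem.Dict.get? bToolCat t with
      | some c => (st.1.add c, st.2)
      | none => (st.1, st.2 ++ [t])) (PySem.Set.empty, [])
  let parts := (bCategories.filter (fun c => PySem.Set.contains st.1 c.1)).map (fun c => c.2)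
  let parts := if st.2.isEmpty then parts
    else parts ++ ["Specialized (" ++ PySem.Str.join ", " (PySem.List.slice st.2 none (some 3)) ++ ")"]
  PySem.Str.join ", " parts

-- ===== PRECONDITION & SPEC =====
def Spec_get_tool_summary (tools : List String) (out : String) : Prop := out = get_tool_summary_alt tools
instance (tools : List String) (out : String) : Decidable (Spec_get_tool_summary tools out) := by unfold Spec_get_tool_summary; infer_instance

-- ===== CLAIM (what is proved, stated in full; the proofs are below) =====
def Claim_equal_get_tool_summary : Prop := ∀ (tools : List String), Dom_get_tool_summary tools → Spec_get_tool_summary tools (get_tool_summary tools)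

-- ===== LEMMAS AND PROOFS =====

-- the reverse dict looked up on an arbitrary string, as an if-chain over the five name lists
theorem get?_bToolCat (t : String) :
    PySem.Dict.get? bToolCat t =
      if t ∈ (["Read", "Grep", "Search", "Glob", "LS"] : List String) then some "read"
      else if t ∈ (["Write", "Edit", "MultiEdit"] : List String) then some "write"
      else if t = "Bash" then some "execute"
      else if t ∈ (["WebSearch", "WebFetch"] : List String) then some "web"
      else if t ∈ (["NotebookRead", "NotebookEdit"] : List String) then some "notebook"
      else none := by
  rcases eq_or_ne "Read" t with h | h1
  · subst h; decide
  rcases eq_or_ne "Grep" t with h | h2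
  · subst h; decide
  rcases eq_or_ne "Search" t with h | h3
  · subst h; decide
  rcases eq_or_ne "Glob" t with h | h4
  · subst h; decide
  rcases eq_or_ne "LS" t with h | h5
  · subst h; decide
  rcases eq_or_ne "Write" t with h | h6
  · subst h; decide
  rcases eq_or_ne "Edit" t with h | h7
  · subst h; decide
  rcases eq_or_ne "MultiEdit" t with h | h8
  · subst h; decide
  rcases eq_or_ne "Bash" t with h | h9
  · subst h; decide
  rcases eq_or_ne "WebSearch" t with h | h10
  · subst h; decide
  rcases eq_or_ne "WebFetch" t with h | h11
  · subst h; decide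
  rcases eq_or_ne "NotebookRead" t with h | h12
  · subst h; decide
  rcases eq_or_ne "NotebookEdit" t with h | h13
  · subst h; decide
  simp [bToolCat, PySem.Dict.get?_mk_cons, PySem.Dict.get?, beq_iff_eq, h1, h1.symm, h2, h2.symm, h3, h3.symm, h4, h4.symm, h5, h5.symm, h6, h6.symm, h7, h7.symm, h8, h8.symm, h9, h9.symm, h10, h10.symm, h11, h11.symm, h12, h12.symm, h13, h13.symm]

-- B's single pass, split into its two independent components
theorem b_fold_split (tools : List String) (s : PySem.Set String) (o : List String) :
    tools.foldl (fun (st : PySem.Set String × List String) t =>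
      match PySem.Dict.get? bToolCat t with
      | some c => (st.1.add c, st.2)
      | none => (st.1, st.2 ++ [t])) (s, o) =
      (tools.foldl (fun (s : PySem.Set String) t =>
      match PySem.Dict.get? bToolCat t with
      | some c => s.add c
      | none => s) s,
       o ++ tools.filter (fun t => (PySem.Dict.get? bToolCat t).isNone)) := by
  induction tools generalizing s o with
  | nil => simp
  | cons t ts ih =>
    cases h : PySem.Dict.get? bToolCat t with
    | none => simp [List.foldl_cons, h, ih]
    | some c => simp [List.foldl_cons, h, ih]

theorem b_fold_fst (tools : List String) :
    (tools.foldl (fun (st : PySem.Set String × List String) t =>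
      match PySem.Dict.get? bToolCat t with
      | some c => (st.1.add c, st.2)
      | none => (st.1, st.2 ++ [t])) (PySem.Set.empty, [])).1 = tools.foldl (fun (s : PySem.Set String) t =>
      match PySem.Dict.get? bToolCat t with
      | some c => s.add c
      | none => s) PySem.Set.empty := by
  rw [b_fold_split]

theorem b_fold_snd (tools : List String) :
    (tools.foldl (fun (st : PySem.Set String × List String) t =>
      match PySem.Dict.get? bToolCat t with
      | some c => (st.1.add c, st.2)
      | none => (st.1, st.2 ++ [t])) (PySem.Set.empty, [])).2
      = tools.filter (fun t => (PySem.Dict.get? bToolCat t).isNone) := by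
  rw [b_fold_split]
  exact List.nil_append _

theorem mem_b_present (tools : List String) (s : PySem.Set String) (k : String) :
    (k ∈ tools.foldl (fun (s : PySem.Set String) t =>
      match PySem.Dict.get? bToolCat t with
      | some c => s.add c
      | none => s) s) ↔ k ∈ s ∨ ∃ t ∈ tools, PySem.Dict.get? bToolCat t = some k := by
  induction tools generalizing s with
  | nil => simp
  | cons t ts ih =>
    cases h : PySem.Dict.get? bToolCat t with
    | none => simp [List.foldl_cons, h, ih]
    | some c =>
      simp [List.foldl_cons, h, ih, PySem.Set.mem_add]
      tauto

theorem get?_eq_read (t : String) :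
    (PySem.Dict.get? bToolCat t = some "read") ↔ t ∈ (["Read", "Grep", "Search", "Glob", "LS"] : List String) := by
  rcases eq_or_ne "Read" t with h | h1
  · subst h; decide
  rcases eq_or_ne "Grep" t with h | h2
  · subst h; decide
  rcases eq_or_ne "Search" t with h | h3
  · subst h; decide
  rcases eq_or_ne "Glob" t with h | h4
  · subst h; decide
  rcases eq_or_ne "LS" t with h | h5
  · subst h; decide
  rcases eq_or_ne "Write" t with h | h6
  · subst h; decide
  rcases eq_or_ne "Edit" t with h | h7
  · subst h; decide
  rcases eq_or_ne "MultiEdit" t with h | h8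
  · subst h; decide
  rcases eq_or_ne "Bash" t with h | h9
  · subst h; decide
  rcases eq_or_ne "WebSearch" t with h | h10
  · subst h; decide
  rcases eq_or_ne "WebFetch" t with h | h11
  · subst h; decide
  rcases eq_or_ne "NotebookRead" t with h | h12
  · subst h; decide
  rcases eq_or_ne "NotebookEdit" t with h | h13
  · subst h; decide
  simp [get?_bToolCat, h1, h1.symm, h2, h2.symm, h3, h3.symm, h4, h4.symm, h5, h5.symm, h6, h6.symm, h7, h7.symm, h8, h8.symm, h9, h9.symm, h10, h10.symm, h11, h11.symm, h12, h12.symm, h13, h13.symm]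

theorem get?_eq_write (t : String) :
    (PySem.Dict.get? bToolCat t = some "write") ↔ t ∈ (["Write", "Edit", "MultiEdit"] : List String) := by
  rcases eq_or_ne "Read" t with h | h1
  · subst h; decide
  rcases eq_or_ne "Grep" t with h | h2
  · subst h; decide
  rcases eq_or_ne "Search" t with h | h3
  · subst h; decide
  rcases eq_or_ne "Glob" t with h | h4
  · subst h; decide
  rcases eq_or_ne "LS" t with h | h5
  · subst h; decide
  rcases eq_or_ne "Write" t with h | h6
  · subst h; decide
  rcases eq_or_ne "Edit" t with h | h7
  · subst h; decide
  rcases eq_or_ne "MultiEdit" t with h | h8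
  · subst h; decide
  rcases eq_or_ne "Bash" t with h | h9
  · subst h; decide
  rcases eq_or_ne "WebSearch" t with h | h10
  · subst h; decide
  rcases eq_or_ne "WebFetch" t with h | h11
  · subst h; decide
  rcases eq_or_ne "NotebookRead" t with h | h12
  · subst h; decide
  rcases eq_or_ne "NotebookEdit" t with h | h13
  · subst h; decide
  simp [get?_bToolCat, h1, h1.symm, h2, h2.symm, h3, h3.symm, h4, h4.symm, h5, h5.symm, h6, h6.symm, h7, h7.symm, h8, h8.symm, h9, h9.symm, h10, h10.symm, h11, h11.symm, h12, h12.symm, h13, h13.symm]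

theorem get?_eq_execute (t : String) :
    (PySem.Dict.get? bToolCat t = some "execute") ↔ t ∈ (["Bash"] : List String) := by
  rcases eq_or_ne "Read" t with h | h1
  · subst h; decide
  rcases eq_or_ne "Grep" t with h | h2
  · subst h; decide
  rcases eq_or_ne "Search" t with h | h3
  · subst h; decide
  rcases eq_or_ne "Glob" t with h | h4
  · subst h; decide
  rcases eq_or_ne "LS" t with h | h5
  · subst h; decide
  rcases eq_or_ne "Write" t with h | h6
  · subst h; decide
  rcases eq_or_ne "Edit" t with h | h7
  · subst h; decide
  rcases eq_or_ne "MultiEdit" t with h | h8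
  · subst h; decide
  rcases eq_or_ne "Bash" t with h | h9
  · subst h; decide
  rcases eq_or_ne "WebSearch" t with h | h10
  · subst h; decide
  rcases eq_or_ne "WebFetch" t with h | h11
  · subst h; decide
  rcases eq_or_ne "NotebookRead" t with h | h12
  · subst h; decide
  rcases eq_or_ne "NotebookEdit" t with h | h13
  · subst h; decide
  simp [get?_bToolCat, h1, h1.symm, h2, h2.symm, h3, h3.symm, h4, h4.symm, h5, h5.symm, h6, h6.symm, h7, h7.symm, h8, h8.symm, h9, h9.symm, h10, h10.symm, h11, h11.symm, h12, h12.symm, h13, h13.symm]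

theorem get?_eq_web (t : String) :
    (PySem.Dict.get? bToolCat t = some "web") ↔ t ∈ (["WebSearch", "WebFetch"] : List String) := by
  rcases eq_or_ne "Read" t with h | h1
  · subst h; decide
  rcases eq_or_ne "Grep" t with h | h2
  · subst h; decide
  rcases eq_or_ne "Search" t with h | h3
  · subst h; decide
  rcases eq_or_ne "Glob" t with h | h4
  · subst h; decide
  rcases eq_or_ne "LS" t with h | h5
  · subst h; decide
  rcases eq_or_ne "Write" t with h | h6
  · subst h; decide
  rcases eq_or_ne "Edit" t with h | h7
  · subst h; decide
  rcases eq_or_ne "MultiEdit" t with h | h8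
  · subst h; decide
  rcases eq_or_ne "Bash" t with h | h9
  · subst h; decide
  rcases eq_or_ne "WebSearch" t with h | h10
  · subst h; decide
  rcases eq_or_ne "WebFetch" t with h | h11
  · subst h; decide
  rcases eq_or_ne "NotebookRead" t with h | h12
  · subst h; decide
  rcases eq_or_ne "NotebookEdit" t with h | h13
  · subst h; decide
  simp [get?_bToolCat, h1, h1.symm, h2, h2.symm, h3, h3.symm, h4, h4.symm, h5, h5.symm, h6, h6.symm, h7, h7.symm, h8, h8.symm, h9, h9.symm, h10, h10.symm, h11, h11.symm, h12, h12.symm, h13, h13.symm]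

theorem get?_eq_notebook (t : String) :
    (PySem.Dict.get? bToolCat t = some "notebook") ↔ t ∈ (["NotebookRead", "NotebookEdit"] : List String) := by
  rcases eq_or_ne "Read" t with h | h1
  · subst h; decide
  rcases eq_or_ne "Grep" t with h | h2
  · subst h; decide
  rcases eq_or_ne "Search" t with h | h3
  · subst h; decide
  rcases eq_or_ne "Glob" t with h | h4
  · subst h; decide
  rcases eq_or_ne "LS" t with h | h5
  · subst h; decide
  rcases eq_or_ne "Write" t with h | h6
  · subst h; decide
  rcases eq_or_ne "Edit" t with h | h7
  · subst h; decide
  rcases eq_or_ne "MultiEdit" t with h | h8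
  · subst h; decide
  rcases eq_or_ne "Bash" t with h | h9
  · subst h; decide
  rcases eq_or_ne "WebSearch" t with h | h10
  · subst h; decide
  rcases eq_or_ne "WebFetch" t with h | h11
  · subst h; decide
  rcases eq_or_ne "NotebookRead" t with h | h12
  · subst h; decide
  rcases eq_or_ne "NotebookEdit" t with h | h13
  · subst h; decide
  simp [get?_bToolCat, h1, h1.symm, h2, h2.symm, h3, h3.symm, h4, h4.symm, h5, h5.symm, h6, h6.symm, h7, h7.symm, h8, h8.symm, h9, h9.symm, h10, h10.symm, h11, h11.symm, h12, h12.symm, h13, h13.symm]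

theorem get?_isNone_iff (t : String) :
    (PySem.Dict.get? bToolCat t).isNone = true ↔ ¬ (t ∈ (["Read", "Grep", "Search", "Glob", "LS"] : List String) ∨ t ∈ (["Write", "Edit", "MultiEdit"] : List String) ∨ t ∈ (["Bash"] : List String) ∨ t ∈ (["WebSearch", "WebFetch"] : List String) ∨ t ∈ (["NotebookRead", "NotebookEdit"] : List String)) := by
  rcases eq_or_ne "Read" t with h | h1
  · subst h; decide
  rcases eq_or_ne "Grep" t with h | h2
  · subst h; decide
  rcases eq_or_ne "Search" t with h | h3
  · subst h; decide
  rcases eq_or_ne "Glob" t with h | h4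
  · subst h; decide
  rcases eq_or_ne "LS" t with h | h5
  · subst h; decide
  rcases eq_or_ne "Write" t with h | h6
  · subst h; decide
  rcases eq_or_ne "Edit" t with h | h7
  · subst h; decide
  rcases eq_or_ne "MultiEdit" t with h | h8
  · subst h; decide
  rcases eq_or_ne "Bash" t with h | h9
  · subst h; decide
  rcases eq_or_ne "WebSearch" t with h | h10
  · subst h; decide
  rcases eq_or_ne "WebFetch" t with h | h11
  · subst h; decide
  rcases eq_or_ne "NotebookRead" t with h | h12
  · subst h; decide
  rcases eq_or_ne "NotebookEdit" t with h | h13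
  · subst h; decide
  simp [get?_bToolCat, h1, h1.symm, h2, h2.symm, h3, h3.symm, h4, h4.symm, h5, h5.symm, h6, h6.symm, h7, h7.symm, h8, h8.symm, h9, h9.symm, h10, h10.symm, h11, h11.symm, h12, h12.symm, h13, h13.symm]

theorem present_read (tools : List String) :
    PySem.Set.contains (tools.foldl (fun (s : PySem.Set String) t =>
      match PySem.Dict.get? bToolCat t with
      | some c => s.add c
      | none => s) PySem.Set.empty) "read"
      = !(tools.filter (fun t => (["Read", "Grep", "Search", "Glob", "LS"] : List String).contains t)).isEmpty := by
  rw [Bool.eq_iff_iff]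
  simp [mem_b_present, PySem.Set.empty, get?_eq_read, List.filter_eq_nil_iff]
  all_goals exact exists_congr fun x => and_congr_right fun _ => by tauto

theorem present_write (tools : List String) :
    PySem.Set.contains (tools.foldl (fun (s : PySem.Set String) t =>
      match PySem.Dict.get? bToolCat t with
      | some c => s.add c
      | none => s) PySem.Set.empty) "write"
      = !(tools.filter (fun t => (["Write", "Edit", "MultiEdit"] : List String).contains t)).isEmpty := by
  rw [Bool.eq_iff_iff]
  simp [mem_b_present, PySem.Set.empty, get?_eq_write, List.filter_eq_nil_iff]
  all_goals exact exists_congr fun x => and_congr_right fun _ => by tauto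

theorem present_execute (tools : List String) :
    PySem.Set.contains (tools.foldl (fun (s : PySem.Set String) t =>
      match PySem.Dict.get? bToolCat t with
      | some c => s.add c
      | none => s) PySem.Set.empty) "execute"
      = !(tools.filter (fun t => (["Bash"] : List String).contains t)).isEmpty := by
  rw [Bool.eq_iff_iff]
  simp [mem_b_present, PySem.Set.empty, get?_eq_execute, List.filter_eq_nil_iff]
  all_goals exact exists_congr fun x => and_congr_right fun _ => by tauto

theorem present_web (tools : List String) :
    PySem.Set.contains (tools.foldl (fun (s : PySem.Set String) t =>
      match PySem.Dict.get? bToolCat t with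
      | some c => s.add c
      | none => s) PySem.Set.empty) "web"
      = !(tools.filter (fun t => (["WebSearch", "WebFetch"] : List String).contains t)).isEmpty := by
  rw [Bool.eq_iff_iff]
  simp [mem_b_present, PySem.Set.empty, get?_eq_web, List.filter_eq_nil_iff]
  all_goals exact exists_congr fun x => and_congr_right fun _ => by tauto

theorem present_notebook (tools : List String) :
    PySem.Set.contains (tools.foldl (fun (s : PySem.Set String) t =>
      match PySem.Dict.get? bToolCat t with
      | some c => s.add c
      | none => s) PySem.Set.empty) "notebook"
      = !(tools.filter (fun t => (["NotebookRead", "NotebookEdit"] : List String).contains t)).isEmpty := by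
  rw [Bool.eq_iff_iff]
  simp [mem_b_present, PySem.Set.empty, get?_eq_notebook, List.filter_eq_nil_iff]
  all_goals exact exists_congr fun x => and_congr_right fun _ => by tauto

-- the label appended by A's if-elif chain for a given category key
def labelOf (c : String) : List String :=
  if c == "read" then ["Code reading/searching"]
  else if c == "write" then ["Code modification"]
  else if c == "execute" then ["Command execution"]
  else if c == "web" then ["Web research"]
  else if c == "notebook" then ["Jupyter notebooks"]
  else []

theorem lab_read : labelOf "read" = ["Code reading/searching"] := rfl

theorem lab_write : labelOf "write" = ["Code modification"] := rfl

theorem lab_execute : labelOf "execute" = ["Command execution"] := rfl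

theorem lab_web : labelOf "web" = ["Web research"] := rfl

theorem lab_notebook : labelOf "notebook" = ["Jupyter notebooks"] := rfl

theorem chain_eq (g : List String) (c : String) :
    (if c == "read" then g ++ ["Code reading/searching"]
     else if c == "write" then g ++ ["Code modification"]
     else if c == "execute" then g ++ ["Command execution"]
     else if c == "web" then g ++ ["Web research"]
     else if c == "notebook" then g ++ ["Jupyter notebooks"]
     else g) = g ++ labelOf c := by
  unfold labelOf; split_ifs <;> simp

-- A's loop over the categories: the labels collected, in category order
theorem a_fold_fst (tools : List String) :
    ∀ (cs : List (String × List String)) (g : List String) (s : PySem.Set String),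
    (cs.foldl (fun (st : List String × PySem.Set String) cp =>
      let matching := tools.filter (fun t => cp.2.contains t)
      if matching.isEmpty then st
      else
        let groups :=
          if cp.1 == "read" then st.1 ++ ["Code reading/searching"]
          else if cp.1 == "write" then st.1 ++ ["Code modification"]
          else if cp.1 == "execute" then st.1 ++ ["Command execution"]
          else if cp.1 == "web" then st.1 ++ ["Web research"]
          else if cp.1 == "notebook" then st.1 ++ ["Jupyter notebooks"]
          else st.1
        (groups, PySem.Set.update st.2 matching)) (g, s)).1
      = g ++ cs.flatMap (fun cp =>
          if (tools.filter (fun t => cp.2.contains t)).isEmpty then [] else labelOf cp.1) := by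
  have h : ∀ (cs : List (String × List String)) (g : List String) (s : PySem.Set String),
      (cs.foldl (fun (st : List String × PySem.Set String) cp =>
      if (tools.filter (fun t => cp.2.contains t)).isEmpty then st
      else
        (if cp.1 == "read" then st.1 ++ ["Code reading/searching"]
         else if cp.1 == "write" then st.1 ++ ["Code modification"]
         else if cp.1 == "execute" then st.1 ++ ["Command execution"]
         else if cp.1 == "web" then st.1 ++ ["Web research"]
         else if cp.1 == "notebook" then st.1 ++ ["Jupyter notebooks"]
         else st.1,
         PySem.Set.update st.2 (tools.filter (fun t => cp.2.contains t)))) (g, s)).1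
        = g ++ cs.flatMap (fun cp =>
          if (tools.filter (fun t => cp.2.contains t)).isEmpty then [] else labelOf cp.1) := by
    intro cs
    induction cs with
    | nil => intro g s; simp
    | cons cp cs ih =>
      intro g s
      by_cases hm : (tools.filter (fun t => cp.2.contains t)).isEmpty = true
      · rw [List.foldl_cons, if_pos hm, ih, List.flatMap_cons, if_pos hm, List.nil_append]
      · rw [List.foldl_cons, if_neg hm, ih, chain_eq, List.flatMap_cons, if_neg hm,
          ← List.append_assoc]
  exact h

-- A's loop over the categories: membership in the `categorized` set
theorem a_fold_snd_mem (tools : List String) :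
    ∀ (cs : List (String × List String)) (g : List String) (s : PySem.Set String) (x : String),
    (x ∈ (cs.foldl (fun (st : List String × PySem.Set String) cp =>
      let matching := tools.filter (fun t => cp.2.contains t)
      if matching.isEmpty then st
      else
        let groups :=
          if cp.1 == "read" then st.1 ++ ["Code reading/searching"]
          else if cp.1 == "write" then st.1 ++ ["Code modification"]
          else if cp.1 == "execute" then st.1 ++ ["Command execution"]
          else if cp.1 == "web" then st.1 ++ ["Web research"]
          else if cp.1 == "notebook" then st.1 ++ ["Jupyter notebooks"]
          else st.1
        (groups, PySem.Set.update st.2 matching)) (g, s)).2)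
      ↔ x ∈ s ∨ ∃ cp ∈ cs, x ∈ tools ∧ cp.2.contains x := by
  have h : ∀ (cs : List (String × List String)) (g : List String) (s : PySem.Set String)
      (x : String),
      (x ∈ (cs.foldl (fun (st : List String × PySem.Set String) cp =>
      if (tools.filter (fun t => cp.2.contains t)).isEmpty then st
      else
        (if cp.1 == "read" then st.1 ++ ["Code reading/searching"]
         else if cp.1 == "write" then st.1 ++ ["Code modification"]
         else if cp.1 == "execute" then st.1 ++ ["Command execution"]
         else if cp.1 == "web" then st.1 ++ ["Web research"]
         else if cp.1 == "notebook" then st.1 ++ ["Jupyter notebooks"]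
         else st.1,
         PySem.Set.update st.2 (tools.filter (fun t => cp.2.contains t)))) (g, s)).2)
        ↔ x ∈ s ∨ ∃ cp ∈ cs, x ∈ tools ∧ cp.2.contains x := by
    intro cs
    induction cs with
    | nil => intro g s x; simp
    | cons cp cs ih =>
      intro g s x
      by_cases hm : (tools.filter (fun t => cp.2.contains t)).isEmpty = true
      · have h1 : ¬ (x ∈ tools ∧ cp.2.contains x = true) := fun hx =>
          (List.filter_eq_nil_iff.mp (List.isEmpty_iff.mp hm)) x hx.1 hx.2
        rw [List.foldl_cons, if_pos hm, ih, List.exists_mem_cons_iff]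
        tauto
      · rw [List.foldl_cons, if_neg hm, ih, List.exists_mem_cons_iff]
        rw [PySem.Set.mem_update]
        simp only [List.mem_filter]
        tauto
  exact h

-- the two "uncategorized" lists coincide
theorem other_eq (tools : List String) :
    tools.filter (fun t =>
        !(PySem.Set.contains (aCategories.foldl (fun (st : List String × PySem.Set String) cp =>
      let matching := tools.filter (fun t => cp.2.contains t)
      if matching.isEmpty then st
      else
        let groups :=
          if cp.1 == "read" then st.1 ++ ["Code reading/searching"]
          else if cp.1 == "write" then st.1 ++ ["Code modification"]
          else if cp.1 == "execute" then st.1 ++ ["Command execution"]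
          else if cp.1 == "web" then st.1 ++ ["Web research"]
          else if cp.1 == "notebook" then st.1 ++ ["Jupyter notebooks"]
          else st.1
        (groups, PySem.Set.update st.2 matching)) ([], PySem.Set.empty)).2 t))
      = tools.filter (fun t => (PySem.Dict.get? bToolCat t).isNone) := by
  apply List.filter_congr
  intro t ht
  have hmem : (t ∈ (aCategories.foldl (fun (st : List String × PySem.Set String) cp =>
      let matching := tools.filter (fun t => cp.2.contains t)
      if matching.isEmpty then st
      else
        let groups :=
          if cp.1 == "read" then st.1 ++ ["Code reading/searching"]
          else if cp.1 == "write" then st.1 ++ ["Code modification"]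
          else if cp.1 == "execute" then st.1 ++ ["Command execution"]
          else if cp.1 == "web" then st.1 ++ ["Web research"]
          else if cp.1 == "notebook" then st.1 ++ ["Jupyter notebooks"]
          else st.1
        (groups, PySem.Set.update st.2 matching)) (([] : List String), PySem.Set.empty)).2)
      ↔ (t ∈ (["Read", "Grep", "Search", "Glob", "LS"] : List String) ∨ t ∈ (["Write", "Edit", "MultiEdit"] : List String) ∨ t ∈ (["Bash"] : List String)
          ∨ t ∈ (["WebSearch", "WebFetch"] : List String) ∨ t ∈ (["NotebookRead", "NotebookEdit"] : List String)) := by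
    rw [a_fold_snd_mem tools]
    simp [aCategories, PySem.Set.empty, ht]
  rw [Bool.eq_iff_iff, Bool.not_eq_true', Bool.eq_false_iff, Ne, PySem.Set.contains_iff, hmem,
    get?_isNone_iff]

theorem ab_eq (tools : List String) : get_tool_summary tools = get_tool_summary_alt tools := by
  cases hE : tools.isEmpty with
  | true => simp [get_tool_summary, get_tool_summary_alt, hE]
  | false =>
    have hne : ¬ (tools.isEmpty = true) := by simp [hE]
    have hother : (tools.filter (fun t => (([] : List String)).contains t)).isEmpty = true := by
      have h0 : tools.filter (fun t => (([] : List String)).contains t) = [] :=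
        List.filter_eq_nil_iff.mpr (fun a _ h => Bool.false_ne_true h)
      rw [h0]; rfl
    unfold get_tool_summary get_tool_summary_alt
    rw [if_neg hne, if_neg hne]
    simp only [b_fold_fst, b_fold_snd, a_fold_fst tools, other_eq tools]
    simp only [bCategories, List.filter_cons, List.filter_nil, List.map_cons, List.map_nil,
      present_read, present_write, present_execute, present_web, present_notebook,
      aCategories, List.flatMap_cons, List.flatMap_nil,
      lab_read, lab_write, lab_execute, lab_web, lab_notebook, hother, reduceIte,
      List.nil_append]
    rcases Bool.eq_false_or_eq_true ((tools.filter (fun t => (["Read", "Grep", "Search", "Glob", "LS"] : List String).contains t)).isEmpty) with h1 | h1 <;>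
      rcases Bool.eq_false_or_eq_true ((tools.filter (fun t => (["Write", "Edit", "MultiEdit"] : List String).contains t)).isEmpty) with h2 | h2 <;>
        rcases Bool.eq_false_or_eq_true ((tools.filter (fun t => (["Bash"] : List String).contains t)).isEmpty) with h3 | h3 <;>
          rcases Bool.eq_false_or_eq_true ((tools.filter (fun t => (["WebSearch", "WebFetch"] : List String).contains t)).isEmpty) with h4 | h4 <;>
            rcases Bool.eq_false_or_eq_true ((tools.filter (fun t => (["NotebookRead", "NotebookEdit"] : List String).contains t)).isEmpty) with h5 | h5 <;>
              simp only [h1, h2, h3, h4, h5, Bool.not_true, Bool.not_false, Bool.false_eq_true,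
                Bool.true_eq_false, eq_self_iff_true, if_true, if_false, List.map_cons,
                List.map_nil, List.nil_append, List.append_nil, List.cons_append,
                List.append_assoc]

-- ===== VERDICT (by name: the statement is the Claim_ definition above) =====
theorem get_tool_summary_spec : Claim_equal_get_tool_summary := by
  intro tools _h
  unfold Spec_get_tool_summary
  exact ab_eq tools
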